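-- pv_equiv track=rewrite | github.com/madeputrateg/TBO | L1.py | rek
-- ===== SOURCE A (Python) =====
-- def rek(state,kata):
--         if len(kata) == 0:
--             return "0"
--         a=kata[len(kata)-1]
--         stslan=rek(state,kata[:len(kata)-1])
--         match stslan:
--             case "0":
--                 if a=="0":
--                     return "1"
--                 elif a=="1":
--                     return "3"
--             case "1":
--                 if a=="0":
--                     return "1"
--                 elif a=="1":
--                     return "2"
--             case "2":
--                 if a=="0":
--                     return "1"
--                 elif a=="1":
--                     return "2"
--             case "3":
--                 if a=="0":
--                     return "4"
--                 elif a=="1":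
--                     return "3"
--             case "4":
--                 if a=="0":
--                     return "4"
--                 elif a=="1":
--                     return "3"
-- ===== SOURCE B (Python) =====
-- _TRANS = {
--     ("0", "0"): "1", ("0", "1"): "3",
--     ("1", "0"): "1", ("1", "1"): "2",
--     ("2", "0"): "1", ("2", "1"): "2",
--     ("3", "0"): "4", ("3", "1"): "3",
--     ("4", "0"): "4", ("4", "1"): "3",
-- }
--
-- def rek(state, kata):
--     s = "0"
--     for c in kata:
--         s = _TRANS.get((s, c))
--     return s
-- ===== Notes on version B (the rewrite author's own statement) =====
-- stated objective: faster
-- what changed: A recurses on kata[:-1], copying a prefix slice at every level (O(n^2) time, O(n) recursion depth); B is a single left-to-right iterative pass over the characters with a transition-table dict (dict.get propagates None past a non-binary char, as A does), no slicing and no recursion.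
-- outside the precondition, e.g. on rek('0', '2'): A returns None, B returns None
import Mathlib
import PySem

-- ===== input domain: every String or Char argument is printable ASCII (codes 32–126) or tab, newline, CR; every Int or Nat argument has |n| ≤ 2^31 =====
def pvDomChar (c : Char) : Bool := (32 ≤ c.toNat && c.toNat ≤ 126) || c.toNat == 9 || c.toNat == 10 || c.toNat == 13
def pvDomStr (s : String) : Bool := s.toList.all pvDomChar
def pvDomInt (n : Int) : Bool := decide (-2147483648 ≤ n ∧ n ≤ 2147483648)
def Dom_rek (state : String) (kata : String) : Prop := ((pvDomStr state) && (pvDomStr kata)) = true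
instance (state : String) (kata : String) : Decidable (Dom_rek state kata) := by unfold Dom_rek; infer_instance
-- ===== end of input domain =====

-- B replaces A's recursion on kata[:-1] (a fresh prefix slice per level) by one
-- iterative left-to-right pass with a transition-table dict; measured faster (asymptotic).

-- ===== PORT A =====
-- A's recursion 'rek(state, kata[:len(kata)-1])' ported on List Char: kata[len(kata)-1]
-- is the last element, kata[:len(kata)-1] is dropLast (exact for these in-range slices).
-- On the fall-through branches Python returns None (no String); those inputs are outside
-- Pre_rek and the port returns "" there.
def rekAux (cs : List Char) : String :=
  if cs.length == 0 then "0"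
  else
    let a := (cs.getLast?).getD ' '      -- kata[len(kata)-1]; cs ≠ [] here
    let stslan := rekAux cs.dropLast     -- rek(state, kata[:len(kata)-1])
    if stslan = "0" then
      if a = '0' then "1" else if a = '1' then "3" else ""
    else if stslan = "1" then
      if a = '0' then "1" else if a = '1' then "2" else ""
    else if stslan = "2" then
      if a = '0' then "1" else if a = '1' then "2" else ""
    else if stslan = "3" then
      if a = '0' then "4" else if a = '1' then "3" else ""
    else if stslan = "4" then
      if a = '0' then "4" else if a = '1' then "3" else ""
    else ""
termination_by cs.length
decreasing_by rename_i h; simp only [beq_iff_eq] at h; simp [List.length_dropLast]; omega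

def rek (state : String) (kata : String) : String := rekAux kata.toList

-- ===== PORT B =====
-- the module-level _TRans dict of Source B
def rekTable : PySem.Dict (String × Char) String := PySem.Dict.ofList
  [(("0", '0'), "1"), (("0", '1'), "3"),
   (("1", '0'), "1"), (("1", '1'), "2"),
   (("2", '0'), "1"), (("2", '1'), "2"),
   (("3", '0'), "4"), (("3", '1'), "3"),
   (("4", '0'), "4"), (("4", '1'), "3")]

-- s = "0"; for c in kata: s = _TRANS.get((s, c)); under Pre_rek the key is always present.
-- Python's .get yields None (no String) on a non-binary char — outside Pre_rek; the port uses "" there.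
def rek_alt (state : String) (kata : String) : String :=
  kata.toList.foldl (fun s c => (rekTable.get? (s, c)).getD "") "0"

-- ===== PRECONDITION & SPEC =====
-- Pre_rek excludes kata containing a character other than '0'/'1': there A falls through
-- its match/if chain and returns None (not a str), and B likewise ends at the None dead state.
def Pre_rek (state : String) (kata : String) : Prop :=
  kata.toList.all (fun c => c == '0' || c == '1') = true
instance (state : String) (kata : String) : Decidable (Pre_rek state kata) := by
  unfold Pre_rek; infer_instance

def pvWitness_rek : String × String := ("q", "0110")

def Spec_rek (state : String) (kata : String) (out : String) : Prop := out = rek_alt state kata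
instance (state : String) (kata : String) (out : String) : Decidable (Spec_rek state kata out) := by
  unfold Spec_rek; infer_instance

-- ===== CLAIM (what is proved, stated in full; the proofs are below) =====
def Claim_equal_rek : Prop := ∀ (state : String) (kata : String),
  Dom_rek state kata → Pre_rek state kata → Spec_rek state kata (rek state kata)

-- ===== LEMMAS AND PROOFS =====

def rekStep (s : String) (c : Char) : String := (rekTable.get? (s, c)).getD ""

def rekGood (s : String) : Prop := s = "0" ∨ s = "1" ∨ s = "2" ∨ s = "3" ∨ s = "4"

theorem rekAux_concat (l : List Char) (a : Char) :
    rekAux (l ++ [a]) =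
      (let st := rekAux l
       if st = "0" then if a = '0' then "1" else if a = '1' then "3" else ""
       else if st = "1" then if a = '0' then "1" else if a = '1' then "2" else ""
       else if st = "2" then if a = '0' then "1" else if a = '1' then "2" else ""
       else if st = "3" then if a = '0' then "4" else if a = '1' then "3" else ""
       else if st = "4" then if a = '0' then "4" else if a = '1' then "3" else ""
       else "") := by
  rw [rekAux.eq_def]
  simp

theorem rekAux_eq_foldl (cs : List Char) (h : ∀ c ∈ cs, c = '0' ∨ c = '1') :
    rekAux cs = cs.foldl rekStep "0" ∧ rekGood (cs.foldl rekStep "0") := by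
  induction cs using List.reverseRecOn with
  | nil =>
    constructor
    · rw [rekAux.eq_def]; rfl
    · left; rfl
  | append_singleton l a ih =>
    have hl : ∀ c ∈ l, c = '0' ∨ c = '1' := fun c hc => h c (by simp [hc])
    have ha : a = '0' ∨ a = '1' := h a (by simp)
    obtain ⟨heq, hgood⟩ := ih hl
    rw [List.foldl_append, rekAux_concat, heq]
    rcases hgood with h5 | h5 | h5 | h5 | h5 <;> rcases ha with rfl | rfl <;>
      rw [h5] <;> exact ⟨by decide, by unfold rekGood; decide⟩

-- ===== VERDICT (by name: the statement is the Claim_ definition above) =====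
theorem rek_spec : Claim_equal_rek := by
  intro state kata _ hpre
  unfold Spec_rek rek rek_alt
  refine (rekAux_eq_foldl kata.toList ?_).1
  intro c hc
  have := List.all_eq_true.mp hpre c hc
  simpa using this
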